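-- pv_equiv track=rewrite | github.com/felipeluis222000/Tetrinho | main.py | Movimentacao
-- ===== SOURCE A (Python) =====
-- def Movimentacao(bloquinho, sentido):
--     final = []
--     if sentido == "baixo":
--         for i in range(len(bloquinho)):
--             final.append([])
--             for j in range(len(bloquinho[i])):
--                 posicao = list(bloquinho[i][j])
--                 final[i].append((posicao[0],posicao[1]+30,posicao[2]))
--
--         return final
--
--     elif sentido == "direita":
--         for i in range(len(bloquinho)):
--             final.append([])
--             for j in range(len(bloquinho[i])):
--                 posicao = list(bloquinho[i][j])
--                 final[i].append((posicao[0]+30,posicao[1],posicao[2]))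
--         return final
--
--     elif sentido == "esquerda":
--         for i in range(len(bloquinho)):
--             final.append([])
--             for j in range(len(bloquinho[i])):
--                 posicao = list(bloquinho[i][j])
--                 final[i].append((posicao[0]-30,posicao[1],posicao[2]))
--         return final
--     elif sentido == "cima":
--         for i in range(len(bloquinho)):
--             final.append([])
--             for j in range(len(bloquinho[i])):
--                 posicao = list(bloquinho[i][j])
--                 final[i].append((posicao[0], posicao[1] - 30,posicao[2]))
--         return final
--     else:
--         return bloquinho
-- ===== SOURCE B (Python) =====
-- _MOV = {"baixo": (1, 30), "direita": (0, 30), "esquerda": (0, -30), "cima": (1, -30)}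
--
-- def Movimentacao(bloquinho, sentido):
--     if sentido not in _MOV:
--         return bloquinho
--     eixo, delta = _MOV[sentido]
--     final = []
--     for linha in bloquinho:
--         if linha:
--             # struct-of-arrays: transpose the row into coordinate columns,
--             # shift the one affected column wholesale, then rezip into tuples
--             cols = [list(c) for c in zip(*linha)]
--             cols[eixo] = [v + delta for v in cols[eixo]]
--             final.append(list(zip(*cols)))
--         else:
--             final.append([])
--     return final
-- ===== Notes on version B (the rewrite author's own statement) =====
-- stated objective: alternative
-- what changed: B replaces A's four duplicated per-point nested loops with a column-wise pass: each row is transposed into coordinate columns, the single (axis,delta)-selected column is shifted wholesale, and the columns are rezipped into tuples.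
import Mathlib
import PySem

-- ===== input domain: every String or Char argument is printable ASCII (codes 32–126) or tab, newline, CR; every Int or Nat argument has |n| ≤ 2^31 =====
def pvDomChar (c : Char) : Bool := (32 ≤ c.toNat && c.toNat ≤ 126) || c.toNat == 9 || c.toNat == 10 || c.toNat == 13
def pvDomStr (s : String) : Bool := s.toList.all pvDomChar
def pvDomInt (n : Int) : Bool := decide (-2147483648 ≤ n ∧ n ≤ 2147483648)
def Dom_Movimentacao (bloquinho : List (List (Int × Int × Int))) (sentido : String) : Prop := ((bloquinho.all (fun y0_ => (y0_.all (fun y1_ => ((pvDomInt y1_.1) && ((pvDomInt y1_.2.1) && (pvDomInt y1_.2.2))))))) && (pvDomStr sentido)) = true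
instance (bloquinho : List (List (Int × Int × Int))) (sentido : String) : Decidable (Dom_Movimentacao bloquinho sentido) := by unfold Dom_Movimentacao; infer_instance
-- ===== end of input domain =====

-- B replaces A's four duplicated per-point nested loops with a column-wise (transpose, shift one column, rezip) pass per row; alternative decomposition, same complexity. The else branch returns the input list unchanged in both.


-- ===== PORT A =====
-- Port of A: four branches in A's order, each its own nested loop over rows and cells.
def Movimentacao (bloquinho : List (List (Int × Int × Int))) (sentido : String) : List (List (Int × Int × Int)) :=
  if sentido == "baixo" then
    bloquinho.map (fun linha => linha.map (fun p => (p.1, p.2.1 + 30, p.2.2)))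
  else if sentido == "direita" then
    bloquinho.map (fun linha => linha.map (fun p => (p.1 + 30, p.2.1, p.2.2)))
  else if sentido == "esquerda" then
    bloquinho.map (fun linha => linha.map (fun p => (p.1 - 30, p.2.1, p.2.2)))
  else if sentido == "cima" then
    bloquinho.map (fun linha => linha.map (fun p => (p.1, p.2.1 - 30, p.2.2)))
  else
    bloquinho

-- ===== PORT B =====
-- B's table: direction → (axis index, delta).
def pvMovTable : PySem.Dict String (Int × Int) :=
  PySem.Dict.ofList [("baixo", (1, 30)), ("direita", (0, 30)), ("esquerda", (0, -30)), ("cima", (1, -30))]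

-- B's per-row transform: transpose the row into its three coordinate columns,
-- shift the selected column wholesale, rezip into tuples (empty row guarded as in Source B).
def pvShiftRow (eixo delta : Int) (linha : List (Int × Int × Int)) : List (Int × Int × Int) :=
  if linha.isEmpty then []
  else
    let c0 := linha.map (fun p => p.1)
    let c1 := linha.map (fun p => p.2.1)
    let c2 := linha.map (fun p => p.2.2)
    let c0' := if eixo == 0 then c0.map (fun v => v + delta) else c0
    let c1' := if eixo == 1 then c1.map (fun v => v + delta) else c1
    List.zipWith (fun x yz => (x, yz)) c0' (List.zipWith Prod.mk c1' c2)

def Movimentacao_alt (bloquinho : List (List (Int × Int × Int))) (sentido : String) : List (List (Int × Int × Int)) :=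
  match pvMovTable.get? sentido with
  | none => bloquinho
  | some (eixo, delta) => bloquinho.map (pvShiftRow eixo delta)

-- ===== PRECONDITION & SPEC =====
def Spec_Movimentacao (bloquinho : List (List (Int × Int × Int))) (sentido : String) (out : List (List (Int × Int × Int))) : Prop := out = Movimentacao_alt bloquinho sentido
instance (bloquinho : List (List (Int × Int × Int))) (sentido : String) (out : List (List (Int × Int × Int))) : Decidable (Spec_Movimentacao bloquinho sentido out) := by unfold Spec_Movimentacao; infer_instance

-- ===== CLAIM (what is proved, stated in full; the proofs are below) =====
def Claim_equal_Movimentacao : Prop := ∀ (bloquinho : List (List (Int × Int × Int))) (sentido : String), Dom_Movimentacao bloquinho sentido → Spec_Movimentacao bloquinho sentido (Movimentacao bloquinho sentido)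

-- ===== LEMMAS AND PROOFS =====
theorem pvShiftRow_axis0 (d : Int) (linha : List (Int × Int × Int)) :
    pvShiftRow 0 d linha = linha.map (fun p => (p.1 + d, p.2.1, p.2.2)) := by
  cases linha with
  | nil => rfl
  | cons a t => simp [pvShiftRow, List.map_map, List.zipWith_map, Function.comp]

theorem pvShiftRow_axis1 (d : Int) (linha : List (Int × Int × Int)) :
    pvShiftRow 1 d linha = linha.map (fun p => (p.1, p.2.1 + d, p.2.2)) := by
  cases linha with
  | nil => rfl
  | cons a t => simp [pvShiftRow, List.map_map, List.zipWith_map, Function.comp]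

-- ===== VERDICT (by name: the statement is the Claim_ definition above) =====
theorem Movimentacao_spec : Claim_equal_Movimentacao := by
  intro bloquinho sentido _
  unfold Spec_Movimentacao Movimentacao Movimentacao_alt
  have hd : pvMovTable.items = [("baixo", (1:Int), (30:Int)), ("direita", 0, 30), ("esquerda", 0, -30), ("cima", 1, -30)] := by decide
  by_cases h1 : sentido = "baixo"
  · subst h1; simp [PySem.Dict.get?, hd, pvShiftRow_axis1]
  · by_cases h2 : sentido = "direita"
    · subst h2; simp [PySem.Dict.get?, hd, pvShiftRow_axis0]
    · by_cases h3 : sentido = "esquerda"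
      · subst h3; simp [PySem.Dict.get?, hd, pvShiftRow_axis0, sub_eq_add_neg]
      · by_cases h4 : sentido = "cima"
        · subst h4; simp [PySem.Dict.get?, hd, pvShiftRow_axis1, sub_eq_add_neg]
        · have e1 : ("baixo" == sentido) = false := by simp [Ne.symm h1]
          have e2 : ("direita" == sentido) = false := by simp [Ne.symm h2]
          have e3 : ("esquerda" == sentido) = false := by simp [Ne.symm h3]
          have e4 : ("cima" == sentido) = false := by simp [Ne.symm h4]
          simp [PySem.Dict.get?, hd, List.find?, e1, e2, e3, e4, h1, h2, h3, h4]
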